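-- pv_equiv track=rewrite | github.com/sumakola/sumacp | 03-recursion_onlyevendigits-Python/recursion_onlyevendigits.py | checkForEvens
-- ===== SOURCE A (Python) =====
-- def checkForEvens(number, newNum=0, powers=1):
--     # base case checks if we have already loooped through the whole number
--     digit = number % 10
--     if number <= 0:
--         return newNum
--     else:
--         # first we get the number from the very left
--         if digit % 2 == 0:
--             # add the firstDigit to our newNum
--             newNum += digit * powers
--             number //= 10
--             # strip down the number by 10
--             powers *= 10
--             return checkForEvens(number, newNum, powers)
--         else:
--             number //= 10
--             return checkForEvens(number, newNum, powers)
-- ===== SOURCE B (Python) =====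
-- def checkForEvens(number, newNum=0, powers=1):
--     # pack the even digits of number (least-significant first), then place the
--     # packed value at the caller's scale in one multiplication.
--     return newNum + powers * _evenPack(number)
--
--
-- def _evenPack(n):
--     # direct structural recursion, no accumulator threading
--     if n <= 0:
--         return 0
--     rest = _evenPack(n // 10)
--     d = n % 10
--     return d + 10 * rest if d % 2 == 0 else rest
-- ===== Notes on version B (the rewrite author's own statement) =====
-- stated objective: alternative
-- what changed: Replaces A's accumulator-threading tail recursion (carrying newNum and a growing powers multiplier) with a plain structural recursion that packs the even digits directly and applies newNum/powers once by a closed-form combination.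
import Mathlib
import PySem

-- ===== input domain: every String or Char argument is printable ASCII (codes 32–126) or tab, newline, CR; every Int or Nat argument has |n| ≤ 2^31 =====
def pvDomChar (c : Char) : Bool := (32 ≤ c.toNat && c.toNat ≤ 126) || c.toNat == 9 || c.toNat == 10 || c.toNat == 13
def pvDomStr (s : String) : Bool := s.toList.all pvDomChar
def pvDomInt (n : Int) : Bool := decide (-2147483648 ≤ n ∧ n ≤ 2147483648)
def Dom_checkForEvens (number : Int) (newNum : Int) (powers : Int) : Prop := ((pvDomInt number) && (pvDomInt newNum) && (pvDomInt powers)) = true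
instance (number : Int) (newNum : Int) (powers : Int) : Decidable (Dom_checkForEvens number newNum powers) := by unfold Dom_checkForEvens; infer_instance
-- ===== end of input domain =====

-- ===== PORT A =====
-- B replaces A's accumulator-threading tail recursion by a direct structural
-- recursion packing the even digits, combined with newNum/powers in closed form.
def checkForEvens (number : Int) (newNum : Int) (powers : Int) : Int :=
  let digit := PySem.Int.mod number 10
  if number ≤ 0 then newNum
  else
    if PySem.Int.mod digit 2 = 0 then
      checkForEvens (PySem.Int.floordiv number 10) (newNum + digit * powers) (powers * 10)
    else
      checkForEvens (PySem.Int.floordiv number 10) newNum powers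
termination_by number.toNat
decreasing_by
  all_goals
    rw [PySem.Int.floordiv_eq_ediv_of_pos (by omega : (0:Int) < 10)]
    omega

-- ===== PORT B =====
def evenPack (n : Int) : Int :=
  if n ≤ 0 then 0
  else
    let rest := evenPack (PySem.Int.floordiv n 10)
    let d := PySem.Int.mod n 10
    if PySem.Int.mod d 2 = 0 then d + 10 * rest else rest
termination_by n.toNat
decreasing_by
  rw [PySem.Int.floordiv_eq_ediv_of_pos (by omega : (0:Int) < 10)]
  omega

def checkForEvens_alt (number : Int) (newNum : Int) (powers : Int) : Int :=
  newNum + powers * evenPack number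

-- ===== PRECONDITION & SPEC =====
def Spec_checkForEvens (number : Int) (newNum : Int) (powers : Int) (out : Int) : Prop := out = checkForEvens_alt number newNum powers
instance (number : Int) (newNum : Int) (powers : Int) (out : Int) : Decidable (Spec_checkForEvens number newNum powers out) := by unfold Spec_checkForEvens; infer_instance

-- ===== CLAIM (what is proved, stated in full; the proofs are below) =====
def Claim_equal_checkForEvens : Prop := ∀ (number : Int) (newNum : Int) (powers : Int), Dom_checkForEvens number newNum powers → Spec_checkForEvens number newNum powers (checkForEvens number newNum powers)

-- ===== LEMMAS AND PROOFS =====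

theorem checkForEvens_eq_pack (k : Nat) :
    ∀ (n a p : Int), n.toNat ≤ k → checkForEvens n a p = a + p * evenPack n := by
  induction k with
  | zero =>
    intro n a p h
    have hn : n ≤ 0 := by omega
    rw [checkForEvens, evenPack]
    simp [hn]
  | succ k ih =>
    intro n a p h
    by_cases hn : n ≤ 0
    · rw [checkForEvens, evenPack]; simp [hn]
    · have hlt : (PySem.Int.floordiv n 10).toNat ≤ k := by
        rw [PySem.Int.floordiv_eq_ediv_of_pos (by omega : (0:Int) < 10)]
        omega
      rw [checkForEvens, evenPack]
      simp only [hn, if_false]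
      by_cases hd : PySem.Int.mod (PySem.Int.mod n 10) 2 = 0
      · simp only [hd, if_true]
        rw [ih _ _ _ hlt]
        ring
      · simp only [hd, if_false]
        rw [ih _ _ _ hlt]

-- ===== VERDICT (by name: the statement is the Claim_ definition above) =====
theorem checkForEvens_spec : Claim_equal_checkForEvens := by
  intro n a p _
  unfold Spec_checkForEvens checkForEvens_alt
  exact checkForEvens_eq_pack n.toNat n a p (le_refl _)
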